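-- pv_equiv track=rewrite | github.com/ikozhukhov/oTTo | src/otto/utils/__init__.py | calc_distribution
-- ===== SOURCE A (Python) =====
-- from collections import OrderedDict
--
-- def unique(seq):
--     """
--     a simple fast uniq using dicts
--     """
--     keys = OrderedDict()
--     for e in seq:
--         keys[e] = 1
--     return keys.keys()
--
-- def calc_distribution(initiators, chassis, controller_list):
--     # display balance of initiators across controllers
--     controllers = list()
--     num_controllers = range(len(controller_list))
--     for _ in num_controllers:
--         controllers.append([])  # num of initiators attached
--     for i in initiators.keys():
--         curr_init = initiators[i]
--         for targ in curr_init: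
--             cntlr = chassis[targ]
--             controllers[cntlr - 1].append(i)
--     r = []
--     for controller in controllers:
--         r.append(len(unique(controller)))
--     return r
-- ===== SOURCE B (Python) =====
-- def calc_distribution(initiators, chassis, controller_list):
--     # one pass: for each initiator, count each of its distinct controllers once
--     counts = [0] * len(controller_list)
--     for targets in initiators.values():
--         for c in {chassis[t] - 1 for t in targets}:
--             counts[c] += 1
--     return counts
-- ===== Notes on version B (the rewrite author's own statement) =====
-- stated objective: simpler
-- what changed: A builds a per-controller list of initiator names (appending once per target) and then runs a separate dict-based uniquify pass over each list; B keeps a single counter per controller and, per initiator, increments each of its distinct controller indices once, so the per-controller name lists and the final uniquify pass disappear. …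
-- outside the precondition, e.g. on calc_distribution({'i': ['t1', 't2']}, {'t1': 0, 't2': 2}, ['a', 'b']): A returns [0, 1], B returns [0, 2]
import Mathlib
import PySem

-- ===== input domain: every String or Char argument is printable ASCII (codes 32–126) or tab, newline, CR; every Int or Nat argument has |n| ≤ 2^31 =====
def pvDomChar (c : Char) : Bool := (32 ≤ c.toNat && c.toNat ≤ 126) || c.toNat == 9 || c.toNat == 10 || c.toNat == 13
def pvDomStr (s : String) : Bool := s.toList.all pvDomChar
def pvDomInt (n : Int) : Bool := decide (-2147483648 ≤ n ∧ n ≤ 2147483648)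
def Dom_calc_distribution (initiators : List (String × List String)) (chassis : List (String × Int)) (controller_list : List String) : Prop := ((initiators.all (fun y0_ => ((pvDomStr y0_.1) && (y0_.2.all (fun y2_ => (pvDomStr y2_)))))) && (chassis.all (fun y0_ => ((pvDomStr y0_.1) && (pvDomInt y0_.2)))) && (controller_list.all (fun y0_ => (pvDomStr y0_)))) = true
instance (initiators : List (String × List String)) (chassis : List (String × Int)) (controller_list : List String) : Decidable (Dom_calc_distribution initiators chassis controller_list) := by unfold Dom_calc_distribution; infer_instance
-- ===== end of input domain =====

-- B replaces A's per-controller initiator lists + final uniquify pass by a single pass that,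
-- per initiator, increments a counter once for each distinct controller index (objective: simpler).

-- ===== PORT A =====
-- Python helper 'unique' (dict-based dedup), used only for its length
def unique (seq : List String) : List String :=
  (seq.foldl (fun keys e => keys.insert e (1 : Int)) (PySem.Dict.empty : PySem.Dict String Int)).keys

-- inner loop 'for targ in curr_init: cntlr = chassis[targ]; controllers[cntlr-1].append(i)'
def pvAInner (i : String) (targs : List String) (chd : PySem.Dict String Int)
    (controllers : List (List String)) : Option (List (List String)) :=
  match targs with
  | [] => some controllers
  | t :: ts =>
    match chd.get? t with
    | none => none                      -- KeyError
    | some cntlr =>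
      match PySem.List.pyGet? controllers (cntlr - 1) with
      | none => none                    -- IndexError
      | some lst => pvAInner i ts chd (PySem.List.pySetD controllers (cntlr - 1) (lst ++ [i]))

-- outer loop 'for i in initiators.keys(): ...'
def pvALoop (items : List (String × List String)) (chd : PySem.Dict String Int)
    (controllers : List (List String)) : Option (List (List String)) :=
  match items with
  | [] => some controllers
  | (i, curr) :: rest =>
    match pvAInner i curr chd controllers with
    | none => none
    | some cs => pvALoop rest chd cs

def calc_distribution (initiators : List (String × List String)) (chassis : List (String × Int)) (controller_list : List String) : List Int :=
  let controllers : List (List String) := controller_list.map (fun _ => [])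
  match pvALoop (PySem.Dict.ofList initiators).items (PySem.Dict.ofList chassis) controllers with
  | none => []   -- unreachable under Pre_
  | some cs => cs.map (fun controller => ((unique controller).length : Int))

-- ===== PORT B =====
-- one step of the set comprehension '{chassis[t] - 1 for t in targets}'
def pvBStep (chd : PySem.Dict String Int) (acc : Option (PySem.Set Int)) (t : String) :
    Option (PySem.Set Int) :=
  acc.bind (fun s => (chd.get? t).map (fun v => PySem.Set.add s (v - 1)))

-- 'counts[c] += 1'
def pvBIncr (counts : List Int) (c : Int) : Option (List Int) :=
  match PySem.List.pyGet? counts c with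
  | none => none                        -- IndexError
  | some x => some (PySem.List.pySetD counts c (x + 1))

def calc_distribution_alt (initiators : List (String × List String)) (chassis : List (String × Int)) (controller_list : List String) : List Int :=
  let chd := PySem.Dict.ofList chassis
  match (PySem.Dict.ofList initiators).values.foldl
      (fun acc targets => acc.bind (fun counts =>
        (targets.foldl (pvBStep chd) (some PySem.Set.empty)).bind (fun S =>
          S.foldl (fun a c => a.bind (fun m => pvBIncr m c)) (some counts))))
      (some (List.replicate controller_list.length (0 : Int))) with
  | none => []   -- unreachable under Pre_
  | some counts => counts

-- ===== PRECONDITION & SPEC =====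
-- Pre_ excludes (first clause) exactly the inputs on which A raises — a target missing from chassis
-- (KeyError) or a chassis value whose index cntlr-1 is out of Python range for controller_list
-- (IndexError) — and (second clause) the corner where one initiator has targets whose chassis
-- controller numbers differ by exactly len(controller_list): there two distinct raw indices denote
-- the same slot via Python's negative-index wraparound, A's name-dedup counts the initiator once
-- while B's index-dedup counts it twice, and with such out-of-range controller numbers neither
-- value is specified. (Stated over the raw association lists, including shadowed duplicate keys.)
def Pre_calc_distribution (initiators : List (String × List String)) (chassis : List (String × Int)) (controller_list : List String) : Prop :=
  (∀ p ∈ initiators, ∀ t ∈ p.2,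
    (chassis.any (fun q => q.1 == t) = true) ∧
    (∀ q ∈ chassis, q.1 = t → PySem.Raise.InRange controller_list.length (q.2 - 1)))
  ∧ (∀ p ∈ initiators, ∀ q1 ∈ chassis, ∀ q2 ∈ chassis,
      q1.1 ∈ p.2 → q2.1 ∈ p.2 → q1.2 ≠ q2.2 + (controller_list.length : Int))
instance (initiators : List (String × List String)) (chassis : List (String × Int)) (controller_list : List String) : Decidable (Pre_calc_distribution initiators chassis controller_list) := by unfold Pre_calc_distribution; infer_instance

def pvWitness_calc_distribution : (List (String × List String)) × (List (String × Int)) × List String :=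
  ([("i1", ["t1", "t2"]), ("i2", ["t1"])], [("t1", 1), ("t2", 2)], ["c1", "c2"])

def Spec_calc_distribution (initiators : List (String × List String)) (chassis : List (String × Int)) (controller_list : List String) (out : List Int) : Prop := out = calc_distribution_alt initiators chassis controller_list
instance (initiators : List (String × List String)) (chassis : List (String × Int)) (controller_list : List String) (out : List Int) : Decidable (Spec_calc_distribution initiators chassis controller_list out) := by unfold Spec_calc_distribution; infer_instance

-- ===== CLAIM (what is proved, stated in full; the proofs are below) =====
def Claim_equal_calc_distribution : Prop := ∀ (initiators : List (String × List String)) (chassis : List (String × Int)) (controller_list : List String), Dom_calc_distribution initiators chassis controller_list → Pre_calc_distribution initiators chassis controller_list → Spec_calc_distribution initiators chassis controller_list (calc_distribution initiators chassis controller_list)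

-- ===== LEMMAS AND PROOFS =====

-- 't is a chassis key and chassis[t]-1 is a valid Python index into controller_list'
def pvPreOk (chd : PySem.Dict String Int) (n : Nat) (t : String) : Bool :=
  match chd.get? t with
  | none => false
  | some v => decide (PySem.Raise.InRange n (v - 1))

-- the (normalized, Nat) controller index of target t, if defined
def pvTIdx (chd : PySem.Dict String Int) (n : Nat) (t : String) : Option Nat :=
  (chd.get? t).bind (fun v => PySem.List.pyIdx? n (v - 1))

-- the block of copies of i that A appends to controller j while processing (i, targs)
def pvBlk (chd : PySem.Dict String Int) (n : Nat) (i : String) (targs : List String) (j : Nat) : List String :=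
  (targs.filter (fun t => pvTIdx chd n t == some j)).map (fun _ => i)

lemma pvIdx_char (n : Nat) (c : Int) (h : PySem.Raise.InRange n c) :
    ∃ k : Nat, PySem.List.pyIdx? n c = some k ∧ k < n ∧
      (k : Int) = (if 0 ≤ c then c else c + n) := by
  obtain ⟨h1, h2⟩ := h
  by_cases h0 : 0 ≤ c
  · refine ⟨c.toNat, ?_, by omega, by rw [if_pos h0]; omega⟩
    unfold PySem.List.pyIdx?
    rw [if_pos h0, if_pos h2]
  · refine ⟨n - (-c).toNat, ?_, by omega, by rw [if_neg h0]; omega⟩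
    unfold PySem.List.pyIdx?
    rw [if_neg h0, if_pos h1]

lemma unique_eq_ofList (seq : List String) : unique seq = PySem.Set.ofList seq := by
  unfold unique
  rw [PySem.Dict.keys_foldl_insert (f := fun _ _ => (1 : Int))]
  rw [PySem.Dict.keys_empty, PySem.Set.update_nil_left]

lemma pvGetD_set {α : Type} (xs : List α) (k j : Nat) (x d : α) (hk : k < xs.length) :
    (xs.set k x).getD j d = if j = k then x else xs.getD j d := by
  simp only [List.getD_eq_getElem?_getD, List.getElem?_set]
  by_cases h : j = k
  · subst h; simp [hk]
  · rw [if_neg (fun h' : k = j => h h'.symm), if_neg h]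

lemma pvAInner_spec (chd : PySem.Dict String Int) (n : Nat) (i : String) (targs : List String)
    (controllers : List (List String)) (hlen : controllers.length = n)
    (hv : ∀ t ∈ targs, pvPreOk chd n t = true) :
    ∃ cs, pvAInner i targs chd controllers = some cs ∧ cs.length = n ∧
      ∀ j, j < n → cs.getD j [] = controllers.getD j [] ++ pvBlk chd n i targs j := by
  induction targs generalizing controllers with
  | nil => exact ⟨controllers, rfl, hlen, fun j hj => by simp [pvBlk]⟩
  | cons t ts ih =>
    have hvt := hv t (by simp)
    unfold pvPreOk at hvt
    rcases hg : chd.get? t with _ | v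
    · rw [hg] at hvt; simp at hvt
    · rw [hg] at hvt; simp only [decide_eq_true_eq] at hvt
      obtain ⟨k, hk, hkn, hkm⟩ := pvIdx_char n (v - 1) hvt
      have hkc : k < controllers.length := by omega
      have hget : PySem.List.pyGet? controllers (v - 1) = some (controllers.getD k []) := by
        simp [PySem.List.pyGet?, hlen, hk, List.getElem?_eq_getElem hkc]
      have hset : PySem.List.pySetD controllers (v - 1) (controllers.getD k [] ++ [i])
          = controllers.set k (controllers.getD k [] ++ [i]) := by
        simp [PySem.List.pySetD, PySem.List.pySet?, hlen, hk]
      obtain ⟨cs, hrun, hcl, hcg⟩ := ih (controllers.set k (controllers.getD k [] ++ [i]))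
        (by simpa using hlen) (fun t' ht' => hv t' (by simp [ht']))
      refine ⟨cs, ?_, hcl, ?_⟩
      · simp only [pvAInner, hg, hget, hset]
        exact hrun
      · intro j hj
        rw [hcg j hj, pvGetD_set _ _ _ _ _ hkc]
        have hblk : pvBlk chd n i (t :: ts) j
            = (if k = j then [i] else []) ++ pvBlk chd n i ts j := by
          simp only [pvBlk, List.filter_cons]
          by_cases hkj : k = j
          · subst hkj; simp [pvTIdx, hg, hk]
          · simp [pvTIdx, hg, hk, hkj]
        rw [hblk]
        by_cases hjk : j = k
        · subst hjk; simp
        · rw [if_neg hjk, if_neg (fun h => hjk h.symm)]; simp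

lemma pvALoop_spec (chd : PySem.Dict String Int) (n : Nat) (items : List (String × List String))
    (controllers : List (List String)) (hlen : controllers.length = n)
    (hv : ∀ p ∈ items, ∀ t ∈ p.2, pvPreOk chd n t = true) :
    ∃ cs, pvALoop items chd controllers = some cs ∧ cs.length = n ∧
      ∀ j, j < n → cs.getD j [] =
        controllers.getD j [] ++ items.flatMap (fun p => pvBlk chd n p.1 p.2 j) := by
  induction items generalizing controllers with
  | nil => exact ⟨controllers, rfl, hlen, fun j hj => by simp⟩
  | cons p rest ih =>
    obtain ⟨i, curr⟩ := p
    obtain ⟨cs1, h1, hl1, hg1⟩ := pvAInner_spec chd n i curr controllers hlen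
      (fun t ht => hv (i, curr) (by simp) t ht)
    obtain ⟨cs, h2, hl2, hg2⟩ := ih cs1 hl1 (fun q hq t ht => hv q (by simp [hq]) t ht)
    refine ⟨cs, ?_, hl2, ?_⟩
    · simp only [pvALoop, h1]
      exact h2
    · intro j hj
      rw [hg2 j hj, hg1 j hj]
      simp [List.append_assoc]

lemma ofList_all_eq (a : String) (xs : List String) (h : ∀ x ∈ xs, x = a) (hne : xs ≠ []) :
    PySem.Set.ofList xs = [a] := by
  induction xs with
  | nil => cases hne rfl
  | cons x xs ih =>
    have hx : x = a := h x (by simp)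
    subst hx
    by_cases h0 : xs = []
    · subst h0; rfl
    · rw [PySem.Set.ofList_cons, ih (fun y hy => h y (by simp [hy])) h0]
      simp [PySem.Set.discard]

lemma distinct_count (chd : PySem.Dict String Int) (n : Nat)
    (items : List (String × List String)) (j : Nat)
    (hkeys : (items.map Prod.fst).Nodup) :
    (PySem.Set.ofList (items.flatMap (fun p => pvBlk chd n p.1 p.2 j))).length
      = items.countP (fun p => p.2.any (fun t => pvTIdx chd n t == some j)) := by
  induction items with
  | nil => simp [PySem.Set.ofList]
  | cons p rest ih =>
    rw [List.map_cons, List.nodup_cons] at hkeys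
    obtain ⟨hpn, hkr⟩ := hkeys
    rw [List.flatMap_cons, PySem.Set.ofList_append, List.countP_cons]
    have hmem : ∀ y ∈ PySem.Set.ofList (rest.flatMap (fun q => pvBlk chd n q.1 q.2 j)),
        ∃ q ∈ rest, y = q.1 := by
      intro y hy
      rw [PySem.Set.mem_ofList] at hy
      obtain ⟨q, hq, hyq⟩ := List.mem_flatMap.mp hy
      obtain ⟨t, _, ht⟩ := List.mem_map.mp hyq
      exact ⟨q, hq, ht.symm⟩
    by_cases hb : p.2.any (fun t => pvTIdx chd n t == some j) = true
    · have hne : pvBlk chd n p.1 p.2 j ≠ [] := by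
        simp only [pvBlk, ne_eq, List.map_eq_nil_iff, List.filter_eq_nil_iff]
        obtain ⟨t, ht, hts⟩ := List.any_eq_true.mp hb
        exact fun hall => absurd hts (by simpa using hall t ht)
      rw [ofList_all_eq p.1 _ (fun x hx => by
            simp only [pvBlk, List.mem_map] at hx; exact hx.choose_spec.2.symm) hne]
      rw [PySem.Set.update_eq_append_filter]
      have hfid : (List.filter (fun y => !(PySem.Set.contains [p.1] y))
          (PySem.Set.ofList (rest.flatMap (fun q => pvBlk chd n q.1 q.2 j))))
          = PySem.Set.ofList (rest.flatMap (fun q => pvBlk chd n q.1 q.2 j)) := by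
        apply List.filter_eq_self.mpr
        intro y hy
        obtain ⟨q, hq, hyq⟩ := hmem y hy
        have hynp : y ≠ p.1 := by
          subst hyq
          intro hc
          exact hpn (List.mem_map.mpr ⟨q, hq, hc⟩)
        simp [PySem.Set.contains_eq_listContains, hynp]
      rw [hfid]
      simp [ih hkr, hb]
    · have hbe : pvBlk chd n p.1 p.2 j = [] := by
        simp only [pvBlk, List.map_eq_nil_iff, List.filter_eq_nil_iff]
        intro t ht
        simp only [List.any_eq_true, not_exists, not_and] at hb
        simpa using hb t ht
      rw [hbe]
      rw [show PySem.Set.ofList ([] : List String) = [] from rfl]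
      rw [PySem.Set.update_nil_left]
      simp [ih hkr, hb]

lemma pvAny_add (S : PySem.Set Int) (c : Int) (f : Int → Bool) :
    (PySem.Set.add S c).any f = (S.any f || f c) := by
  by_cases hc : c ∈ S
  · rw [PySem.Set.add_of_mem hc]
    by_cases hfc : f c = true
    · rw [hfc, Bool.or_true, List.any_eq_true.mpr ⟨c, hc, hfc⟩]
    · rw [Bool.eq_false_iff.mpr hfc, Bool.or_false]
  · rw [PySem.Set.add_of_not_mem hc, List.any_append]
    simp

lemma pvBSet_spec (chd : PySem.Dict String Int) (n : Nat) (P : Int → Prop) (targs : List String)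
    (S0 : PySem.Set Int) (hnd : S0.Nodup)
    (hb : ∀ c ∈ S0, PySem.Raise.InRange n c) (hp0 : ∀ c ∈ S0, P c)
    (hv : ∀ t ∈ targs, pvPreOk chd n t = true)
    (hP : ∀ t ∈ targs, ∀ v, chd.get? t = some v → P (v - 1)) :
    ∃ S, targs.foldl (pvBStep chd) (some S0) = some S ∧ S.Nodup ∧
      (∀ c ∈ S, PySem.Raise.InRange n c) ∧ (∀ c ∈ S, P c) ∧
      (∀ j : Nat, (S.any (fun c => PySem.List.pyIdx? n c == some j))
        = ((S0.any (fun c => PySem.List.pyIdx? n c == some j))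
           || targs.any (fun t => pvTIdx chd n t == some j))) := by
  induction targs generalizing S0 with
  | nil => exact ⟨S0, rfl, hnd, hb, hp0, fun j => by simp⟩
  | cons t ts ih =>
    have hvt := hv t (by simp)
    unfold pvPreOk at hvt
    rcases hg : chd.get? t with _ | v
    · rw [hg] at hvt; simp at hvt
    · rw [hg] at hvt; simp only [decide_eq_true_eq] at hvt
      have hstep : (t :: ts).foldl (pvBStep chd) (some S0)
          = ts.foldl (pvBStep chd) (some (PySem.Set.add S0 (v - 1))) := by
        simp [pvBStep, hg]
      obtain ⟨S, hS, hSnd, hSb, hSp, hSm⟩ := ih (PySem.Set.add S0 (v - 1))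
        (PySem.Set.nodup_add _ _ hnd)
        (fun c hc => by
          rcases (PySem.Set.mem_add _ _ _).mp hc with h | h
          · exact hb c h
          · subst h; exact hvt)
        (fun c hc => by
          rcases (PySem.Set.mem_add _ _ _).mp hc with h | h
          · exact hp0 c h
          · subst h; exact hP t (by simp) v hg)
        (fun t' ht' => hv t' (by simp [ht']))
        (fun t' ht' v' hg' => hP t' (by simp [ht']) v' hg')
      refine ⟨S, by rw [hstep]; exact hS, hSnd, hSb, hSp, ?_⟩
      intro j
      rw [hSm j, pvAny_add]
      simp only [List.any_cons, pvTIdx, hg, Option.bind_some]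
      rw [Bool.or_assoc, Bool.or_comm (PySem.List.pyIdx? n (v - 1) == some j)]

lemma pvIncr_fold (S : PySem.Set Int) (counts : List Int) (hnd : S.Nodup)
    (hb : ∀ c ∈ S, PySem.Raise.InRange counts.length c)
    (hinj : ∀ c ∈ S, ∀ c' ∈ S,
      PySem.List.pyIdx? counts.length c = PySem.List.pyIdx? counts.length c' → c = c') :
    ∃ cs, S.foldl (fun a c => a.bind (fun m => pvBIncr m c)) (some counts) = some cs ∧
      cs.length = counts.length ∧
      ∀ j, j < counts.length →
        cs.getD j 0 = counts.getD j 0 +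
          (if S.any (fun c => PySem.List.pyIdx? counts.length c == some j) then 1 else 0) := by
  induction S generalizing counts with
  | nil => exact ⟨counts, rfl, rfl, fun j hj => by simp⟩
  | cons c S ih =>
    obtain ⟨k, hk, hkn, -⟩ := pvIdx_char counts.length c (hb c (by simp))
    rw [List.nodup_cons] at hnd
    obtain ⟨hcS, hSnd⟩ := hnd
    have hset : pvBIncr counts c = some (counts.set k (counts.getD k 0 + 1)) := by
      simp [pvBIncr, PySem.List.pyGet?, PySem.List.pySetD, PySem.List.pySet?, hk,
            List.getElem?_eq_getElem hkn]
    obtain ⟨cs, hrun, hl, hgd⟩ := ih (counts.set k (counts.getD k 0 + 1)) hSnd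
      (fun c' hc' => by simpa using hb c' (by simp [hc']))
      (fun c1 hc1 c2 hc2 he => by
        apply hinj c1 (by simp [hc1]) c2 (by simp [hc2])
        simpa using he)
    refine ⟨cs, ?_, by simpa using hl, ?_⟩
    · simp only [List.foldl_cons, Option.bind_some, hset]
      exact hrun
    · intro j hj
      have hlen' : (counts.set k (counts.getD k 0 + 1)).length = counts.length :=
        List.length_set ..
      rw [hgd j (by simpa using hj)]
      rw [pvGetD_set _ _ _ _ _ hkn]
      simp only [hlen', List.any_cons, hk]
      by_cases hjk : j = k
      · subst hjk
        have hTS : S.any (fun c' => PySem.List.pyIdx? counts.length c' == some j) = false := by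
          rw [List.any_eq_false]
          intro c' hc' hbad
          have heq : PySem.List.pyIdx? counts.length c' = PySem.List.pyIdx? counts.length c := by
            rw [hk]; simpa using hbad
          exact hcS (hinj c' (by simp [hc']) c (by simp) heq ▸ hc')
        rw [if_pos rfl, hTS]
        simp
      · rw [if_neg hjk]
        have : (some k == some j) = false :=
          beq_eq_false_iff_ne.mpr (fun h => hjk (Option.some.inj h).symm)
        rw [this, Bool.false_or]

lemma pvBOuter_spec (chd : PySem.Dict String Int) (n : Nat) (vals : List (List String))
    (counts : List Int) (hlen : counts.length = n)
    (hv : ∀ targs ∈ vals, ∀ t ∈ targs, pvPreOk chd n t = true)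
    (hinj : ∀ targs ∈ vals, ∀ t ∈ targs, ∀ t' ∈ targs, ∀ v v' : Int,
        chd.get? t = some v → chd.get? t' = some v' → v ≠ v' + (n : Int)) :
    ∃ cs, vals.foldl
        (fun acc targets => acc.bind (fun counts =>
          (targets.foldl (pvBStep chd) (some PySem.Set.empty)).bind (fun S =>
            S.foldl (fun a c => a.bind (fun m => pvBIncr m c)) (some counts))))
        (some counts) = some cs ∧ cs.length = n ∧
      ∀ j, j < n → cs.getD j 0 = counts.getD j 0 +
        ((vals.countP (fun targs => targs.any (fun t => pvTIdx chd n t == some j))) : Int) := by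
  induction vals generalizing counts with
  | nil => exact ⟨counts, rfl, hlen, fun j hj => by simp⟩
  | cons targs rest ih =>
    obtain ⟨S, hS, hSnd, hSb, hSp, hSm⟩ := pvBSet_spec chd n
      (fun c => ∃ t ∈ targs, chd.get? t = some (c + 1)) targs PySem.Set.empty
      List.nodup_nil (fun c hc => absurd hc List.not_mem_nil)
      (fun c hc => absurd hc List.not_mem_nil)
      (hv targs (by simp))
      (fun t ht v hgv => ⟨t, ht, by rw [sub_add_cancel]; exact hgv⟩)
    have hinjS : ∀ c ∈ S, ∀ c' ∈ S,
        PySem.List.pyIdx? n c = PySem.List.pyIdx? n c' → c = c' := by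
      intro c hc c' hc' heq
      obtain ⟨t, ht, hgt⟩ := hSp c hc
      obtain ⟨t', ht', hgt'⟩ := hSp c' hc'
      have hne1 := hinj targs (by simp) t ht t' ht' (c + 1) (c' + 1) hgt hgt'
      have hne2 := hinj targs (by simp) t' ht' t ht (c' + 1) (c + 1) hgt' hgt
      obtain ⟨k, hk, hkn, hkm⟩ := pvIdx_char n c (hSb c hc)
      obtain ⟨k', hk', hkn', hkm'⟩ := pvIdx_char n c' (hSb c' hc')
      rw [hk, hk'] at heq
      have hkk : k = k' := by simpa using heq
      split_ifs at hkm hkm' <;> omega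
    obtain ⟨c1, h1, hl1, hg1⟩ := pvIncr_fold S counts hSnd
      (fun c hc => by rw [hlen]; exact hSb c hc)
      (fun c hc c' hc' he => hinjS c hc c' hc' (by simpa [hlen] using he))
    obtain ⟨cs, h2, hl2, hg2⟩ := ih c1 (by rw [hl1, hlen])
      (fun q hq t ht => hv q (by simp [hq]) t ht)
      (fun q hq => hinj q (by simp [hq]))
    refine ⟨cs, ?_, hl2, ?_⟩
    · simp only [List.foldl_cons, Option.bind_some, hS, Option.bind_some, h1]
      exact h2
    · intro j hj
      rw [hg2 j hj, hg1 j (by omega), List.countP_cons]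
      have hany := hSm j
      simp only [PySem.Set.empty, List.any_nil, Bool.false_or] at hany
      rw [hlen, hany]
      by_cases hb : targs.any (fun t => pvTIdx chd n t == some j) = true
      · rw [hb, if_pos rfl]; push_cast; norm_num; ring
      · rw [Bool.eq_false_iff.mpr hb, if_neg (by simp)]; push_cast; ring

lemma pv_items_update_sub {κ ν : Type} [BEq κ] [LawfulBEq κ] (l : List (κ × ν)) :
    ∀ (d : PySem.Dict κ ν), ∀ p ∈ (d.update l).items, p ∈ d.items ∨ p ∈ l := by
  induction l with
  | nil => intro d p hp; exact Or.inl (by simpa [PySem.Dict.update] using hp)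
  | cons q l ih =>
    intro d p hp
    have hp' : p ∈ ((d.insert q.1 q.2).update l).items := by
      simpa [PySem.Dict.update] using hp
    rcases ih (d.insert q.1 q.2) p hp' with h | h
    · rcases (PySem.Dict.mem_items_insert _ _ _ _).mp h with h1 | h1
      · subst h1; exact Or.inr (by simp)
      · exact Or.inl h1.1
    · exact Or.inr (by simp [h])

lemma pv_mem_items_ofList {κ ν : Type} [BEq κ] [LawfulBEq κ] (l : List (κ × ν)) :
    ∀ p ∈ (PySem.Dict.ofList l).items, p ∈ l := by
  intro p hp
  rcases pv_items_update_sub l PySem.Dict.empty p (by simpa [PySem.Dict.ofList] using hp) with h | h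
  · simp [PySem.Dict.empty] at h
  · exact h

lemma pv_contains_update {κ ν : Type} [BEq κ] [LawfulBEq κ] (l : List (κ × ν)) (t : κ) :
    ∀ (d : PySem.Dict κ ν), (d.contains t = true ∨ ∃ q ∈ l, q.1 = t) →
      (d.update l).contains t = true := by
  induction l with
  | nil =>
    intro d h
    rcases h with hc | ⟨q, hq, -⟩
    · simpa [PySem.Dict.update] using hc
    · exact absurd hq List.not_mem_nil
  | cons q l ih =>
    intro d h
    have : ((d.insert q.1 q.2).update l).contains t = true := by
      apply ih
      rcases h with hc | ⟨r, hr, hrt⟩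
      · left; rw [PySem.Dict.contains_insert]; simp [hc]
      · rcases List.mem_cons.mp hr with h1 | h1
        · left
          rw [PySem.Dict.contains_insert]
          subst h1
          simp [hrt]
        · right; exact ⟨r, h1, hrt⟩
    simpa [PySem.Dict.update] using this

-- ===== VERDICT (by name: the statement is the Claim_ definition above) =====
theorem calc_distribution_spec : Claim_equal_calc_distribution := by
  intro initiators chassis controller_list _hdom hpre0
  obtain ⟨hpre1, hpre2⟩ := hpre0
  unfold Spec_calc_distribution
  have hpre : ∀ p ∈ (PySem.Dict.ofList initiators).items, ∀ t ∈ p.2,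
      pvPreOk (PySem.Dict.ofList chassis) controller_list.length t = true := by
    intro p hp t ht
    obtain ⟨hany, hall⟩ := hpre1 p (pv_mem_items_ofList initiators p hp) t ht
    have hcont : (PySem.Dict.ofList chassis).contains t = true := by
      obtain ⟨q, hq, hqt⟩ := List.any_eq_true.mp hany
      exact pv_contains_update chassis t PySem.Dict.empty
        (Or.inr ⟨q, hq, by simpa using hqt⟩)
    rcases hg2 : (PySem.Dict.ofList chassis).get? t with _ | v
    · rw [PySem.Dict.get?_eq_none_iff_contains] at hg2
      rw [hg2] at hcont
      cases hcont
    · have hmemc : (t, v) ∈ chassis :=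
        pv_mem_items_ofList chassis _ (PySem.Dict.mem_items_of_get?_eq_some _ hg2)
      have hin := hall (t, v) hmemc rfl
      unfold pvPreOk
      rw [hg2]
      simpa using hin
  have hkeysnodup : (((PySem.Dict.ofList initiators).items).map Prod.fst).Nodup := by
    have h := PySem.Dict.nodup_keys_ofList initiators
    simpa [PySem.Dict.keys] using h
  obtain ⟨cs, hrun, hlen, hget⟩ := pvALoop_spec (PySem.Dict.ofList chassis)
    controller_list.length (PySem.Dict.ofList initiators).items
    (controller_list.map fun _ => []) (by simp) hpre
  obtain ⟨bs, hbrun, hblen, hbget⟩ := pvBOuter_spec (PySem.Dict.ofList chassis)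
    controller_list.length ((PySem.Dict.ofList initiators).items.map (fun p => p.2))
    (List.replicate controller_list.length 0) (by simp)
    (fun targs htm t ht => by
      obtain ⟨p, hp, he⟩ := List.mem_map.mp htm
      exact hpre p hp t (he ▸ ht))
    (fun targs htm t ht t' ht' v v' hgv hgv' => by
      obtain ⟨p, hp, he⟩ := List.mem_map.mp htm
      have hpi : p ∈ initiators := pv_mem_items_ofList initiators p hp
      have hmv : (t, v) ∈ chassis :=
        pv_mem_items_ofList chassis _ (PySem.Dict.mem_items_of_get?_eq_some _ hgv)
      have hmv' : (t', v') ∈ chassis :=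
        pv_mem_items_ofList chassis _ (PySem.Dict.mem_items_of_get?_eq_some _ hgv')
      exact hpre2 p hpi (t, v) hmv (t', v') hmv' (he ▸ ht) (he ▸ ht'))
  have hvals : (PySem.Dict.ofList initiators).values
      = (PySem.Dict.ofList initiators).items.map (fun p => p.2) := rfl
  unfold calc_distribution calc_distribution_alt
  simp only [hvals, hrun, hbrun]
  apply List.ext_getElem
  · simp [hlen, hblen]
  · intro j h1 h2
    have hj : j < controller_list.length := by
      simpa [hlen] using h1
    rw [List.getElem_map, ← List.getD_eq_getElem _ [] (by omega),
        ← List.getD_eq_getElem _ 0 (by omega)]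
    rw [hget j hj, hbget j hj]
    have hinit : (List.map (fun _ => ([] : List String)) controller_list).getD j [] = [] := by
      simp [List.getD_eq_getElem?_getD]
    have hrep : (List.replicate controller_list.length (0 : Int)).getD j 0 = 0 := by
      simp [List.getD_eq_getElem?_getD, hj]
    rw [hinit, hrep, List.nil_append, unique_eq_ofList,
        distinct_count _ _ _ _ hkeysnodup, List.countP_map]
    simp [Function.comp_def]
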